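-- pv_equiv track=rewrite | github.com/Konstantin-Bakalov/Python-101-Forever | C01-Python-Basics/Exercise-1/solution.py | iban_formatter
-- ===== SOURCE A (Python) =====
-- def iban_formatter(iban):
--     list = []
--     counter = 0
--
--     for character in iban:
--         if character == ' ':
--             continue
--
--         if counter == 4:
--             list.append(' ')
--             counter = 0
--
--         list.append(character)
--         counter += 1
--
--     return ''.join(list)
-- ===== SOURCE B (Python) =====
-- def iban_formatter(iban):
--     s = ''.join(c for c in iban if c != ' ')
--     return ' '.join(s[i:i+4] for i in range(0, len(s), 4))
-- ===== Notes on version B (the rewrite author's own statement) =====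
-- stated objective: idiomatic
-- what changed: A's single character loop with a mutable counter and accumulator list is replaced by a two-stage clean-then-chunk pipeline: strip all spaces first, then join the 4-character slices s[i:i+4] taken at stride-4 indices.
import Mathlib
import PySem

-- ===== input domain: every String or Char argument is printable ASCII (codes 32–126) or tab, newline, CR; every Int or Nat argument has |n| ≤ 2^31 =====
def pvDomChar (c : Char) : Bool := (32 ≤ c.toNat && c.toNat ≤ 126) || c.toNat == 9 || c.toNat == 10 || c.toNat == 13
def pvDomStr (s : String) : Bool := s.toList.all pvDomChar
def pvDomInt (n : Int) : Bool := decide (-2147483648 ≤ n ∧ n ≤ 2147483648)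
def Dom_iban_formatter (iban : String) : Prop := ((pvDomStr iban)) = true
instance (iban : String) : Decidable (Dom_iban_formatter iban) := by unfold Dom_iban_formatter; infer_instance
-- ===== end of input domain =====

-- B replaces A's character-by-character counter/accumulator loop with a clean-then-chunk
-- decomposition (strip spaces, then join 4-char slices); objective: idiomatic, same cost.

-- ===== PORT A =====
-- A's loop body: skip ' '; at counter 4 append a space and reset; append the char, bump counter.
def ibanStepA (st : List Char × Nat) (character : Char) : List Char × Nat :=
  if character = ' ' then st
  else
    let st := if st.2 = 4 then (st.1 ++ [' '], 0) else st
    (st.1 ++ [character], st.2 + 1)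

def iban_formatter (iban : String) : String :=
  String.ofList (iban.toList.foldl ibanStepA ([], 0)).1

-- ===== PORT B =====
def iban_formatter_alt (iban : String) : String :=
  let s : List Char := iban.toList.filter (fun c => c != ' ')
  String.ofList (PySem.Chars.join [' ']
    ((PySem.List.pyRange 0 (s.length : Int) 4).map
      (fun i => PySem.List.slice s (some i) (some (i + 4)))))

-- ===== PRECONDITION & SPEC =====
def Spec_iban_formatter (iban : String) (out : String) : Prop := out = iban_formatter_alt iban
instance (iban : String) (out : String) : Decidable (Spec_iban_formatter iban out) := by unfold Spec_iban_formatter; infer_instance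

-- ===== CLAIM (what is proved, stated in full; the proofs are below) =====
def Claim_equal_iban_formatter : Prop := ∀ (iban : String), Dom_iban_formatter iban → Spec_iban_formatter iban (iban_formatter iban)

-- ===== LEMMAS AND PROOFS =====

-- the grouped string produced from a clean (space-free) char list, with A's counter made explicit
def ibanJk : Nat → List Char → List Char
  | _, [] => []
  | k, c :: cs => if k = 4 then ' ' :: c :: ibanJk 1 cs else c :: ibanJk (k + 1) cs

-- B's view: successive 4-chunks of a list
def ibanChunk4 : List Char → List (List Char)
  | [] => []
  | c :: cs => ((c :: cs).take 4) :: ibanChunk4 ((c :: cs).drop 4)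
termination_by l => l.length
decreasing_by simp

theorem ibanFoldA_filter (l : List Char) (st : List Char × Nat) :
    l.foldl ibanStepA st = (l.filter (fun c => c != ' ')).foldl ibanStepA st := by
  induction l generalizing st with
  | nil => rfl
  | cons c cs ih =>
    by_cases hc : c = ' '
    · simp [hc, List.foldl_cons, ibanStepA, ih]
    · simp [hc, List.foldl_cons, ih]

theorem ibanFoldA_clean (l : List Char) (h : ∀ c ∈ l, c ≠ ' ') (acc : List Char) (k : Nat) :
    (l.foldl ibanStepA (acc, k)).1 = acc ++ ibanJk k l := by
  induction l generalizing acc k with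
  | nil => simp [ibanJk]
  | cons c cs ih =>
    have hc : c ≠ ' ' := h c (by simp)
    have hcs : ∀ x ∈ cs, x ≠ ' ' := fun x hx => h x (by simp [hx])
    by_cases hk : k = 4 <;>
      simp [List.foldl_cons, ibanStepA, hc, hk, ih hcs, ibanJk]

theorem ibanJk_take (m : Nat) (hm : m ≤ 4) (s : List Char) :
    ibanJk (4 - m) s
      = s.take m ++ (if s.length ≤ m then [] else ' ' :: ibanJk 0 (s.drop m)) := by
  induction m generalizing s with
  | zero =>
    cases s with
    | nil => simp [ibanJk]
    | cons c cs => simp [ibanJk]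
  | succ m ih =>
    cases s with
    | nil => simp [ibanJk]
    | cons c cs =>
      have h1 : 4 - (m + 1) ≠ 4 := by omega
      have h2 : 4 - (m + 1) + 1 = 4 - m := by omega
      simp only [ibanJk, if_neg h1, h2, ih (by omega) cs]
      simp

theorem ibanChunk4_eq_range (s : List Char) :
    (List.range ((s.length + 3) / 4)).map (fun k => (s.drop (4 * k)).take 4)
      = ibanChunk4 s := by
  match s with
  | [] => simp [ibanChunk4]
  | c :: cs =>
    have hlen : ((c :: cs).length + 3) / 4 = (((c :: cs).drop 4).length + 3) / 4 + 1 := by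
      simp only [List.length_cons, List.length_drop]; omega
    rw [hlen, List.range_succ_eq_map, List.map_cons, List.map_map]
    have hfun : ((fun k => ((c :: cs).drop (4 * k)).take 4) ∘ fun i => i + 1)
        = fun k => (((c :: cs).drop 4).drop (4 * k)).take 4 := by
      funext k
      rw [Function.comp_apply, List.drop_drop]
      have h4 : 4 * (k + 1) = 4 + 4 * k := by ring
      rw [h4]
    rw [hfun, ibanChunk4_eq_range ((c :: cs).drop 4), ibanChunk4]
    simp
termination_by s.length
decreasing_by simp

theorem ibanJoin_chunk4 (s : List Char) :
    PySem.Chars.join [' '] (ibanChunk4 s) = ibanJk 0 s := by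
  have hjk := ibanJk_take 4 (le_refl 4) s
  simp only [Nat.sub_self] at hjk
  match s with
  | [] => simp [ibanChunk4, PySem.Chars.join_nil, ibanJk]
  | c :: cs =>
    rw [ibanChunk4]
    by_cases hle : (c :: cs).length ≤ 4
    · have hdrop : (c :: cs).drop 4 = [] := by
        rw [List.drop_eq_nil_iff]; omega
      rw [hdrop, ibanChunk4, PySem.Chars.join_singleton, hjk, if_pos hle, List.append_nil]
    · have ih := ibanJoin_chunk4 ((c :: cs).drop 4)
      have hdrop : (c :: cs).drop 4 ≠ [] :=
        fun h => hle (List.drop_eq_nil_iff.mp h)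
      rcases hq : ibanChunk4 ((c :: cs).drop 4) with _ | ⟨q, rest⟩
      · exfalso
        rcases hd : (c :: cs).drop 4 with _ | ⟨d, ds⟩
        · exact hdrop hd
        · rw [hd, ibanChunk4] at hq; cases hq
      · rw [PySem.Chars.join_cons_cons, ← hq, ih, hjk, if_neg hle]
        simp
termination_by s.length
decreasing_by simp

theorem ibanAlt_eq_jk (iban : String) :
    iban_formatter_alt iban
      = String.ofList (ibanJk 0 (iban.toList.filter (fun c => c != ' '))) := by
  have key : ∀ (s : List Char),
      String.ofList (PySem.Chars.join [' ']
        ((PySem.List.pyRange 0 (s.length : Int) 4).map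
          (fun i => PySem.List.slice s (some i) (some (i + 4)))))
        = String.ofList (ibanJk 0 s) := by
    intro s
    have hcount : (if (0 : Int) < (s.length : Int)
        then (((s.length : Int) - 0 + 4 - 1) / 4).toNat else 0) = (s.length + 3) / 4 := by
      by_cases h : 0 < s.length
      · rw [if_pos (by exact_mod_cast h)]; omega
      · rw [if_neg (by exact_mod_cast h)]; omega
    rw [PySem.List.pyRange_of_pos 0 (s.length : Int) (by norm_num), hcount, List.map_map]
    have hfun : ((fun i => PySem.List.slice s (some i) (some (i + 4))) ∘ fun k : Nat => 0 + 4 * (k : Int))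
        = fun k : Nat => (s.drop (4 * k)).take 4 := by
      funext k
      have h1 : (0 : Int) + 4 * (k : Int) = ((4 * k : Nat) : Int) := by push_cast; ring
      have h2 : ((4 * k : Nat) : Int) + 4 = ((4 * k : Nat) : Int) + ((4 : Nat) : Int) := by
        norm_cast
      rw [Function.comp_apply, h1, h2, PySem.List.slice_natCast_add]
    rw [hfun, ibanChunk4_eq_range, ibanJoin_chunk4]
  unfold iban_formatter_alt
  exact key _

-- ===== VERDICT (by name: the statement is the Claim_ definition above) =====
theorem iban_formatter_spec : Claim_equal_iban_formatter := by
  intro iban _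
  unfold Spec_iban_formatter
  rw [ibanAlt_eq_jk]
  unfold iban_formatter
  rw [ibanFoldA_filter]
  rw [ibanFoldA_clean _ (by intro c hc; simpa using (List.mem_filter.mp hc).2) [] 0]
  simp
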